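-- pv_equiv track=rewrite | github.com/serotonins/ctpo | src/programmers/389480_완전범죄/jh_완전범죄.py | solution
-- ===== SOURCE A (Python) =====
-- def solution(info, n, m):
--     answer = n
--
--     record = {(0,0)}
--     for i,v in enumerate(info):
--         idx = i+1
--
--         temp = set()
--         for a,b in record:
--             if a+v[0] < n:
--                 temp.add((a+v[0],b))
--             if b+v[1] < m:
--                 temp.add((a,b+v[1]))
--
--         if len(temp)==0:
--             return -1
--         record = temp
--
--     for a,b in record:
--         answer = min(answer,a)
--
--     return answer
-- ===== SOURCE B (Python) =====
-- def solution(info, n, m):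
--     # 1D DP: per reachable B-cost keep only the minimal A-cost, instead of
--     # A's breadth-first set of all reachable (A-cost, B-cost) pairs.
--     dp = {0: 0}
--     for v in info:
--         cands = [(b, a + v[0]) for b, a in dp.items() if a + v[0] < n] \
--               + [(b + v[1], a) for b, a in dp.items() if b + v[1] < m]
--         if not cands:
--             return -1
--         dp = {}
--         for b, a in cands:
--             if b not in dp or a < dp[b]:
--                 dp[b] = a
--     return min([n] + list(dp.values()))
-- ===== Notes on version B (the rewrite author's own statement) =====
-- stated objective: faster
-- what changed: Replaces the breadth-first set of all reachable (A-cost,B-cost) pairs by a 1D DP: per item a candidate list is generated by two comprehensions and regrouped into a dict keeping, per reachable B-cost, only the minimal A-cost, so each pass handles at most m states instead of up to n*m pairs.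
-- outside the precondition, e.g. on solution([[100, 100], [0]], 1, 1): A returns -1, B returns -1
import Mathlib
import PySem

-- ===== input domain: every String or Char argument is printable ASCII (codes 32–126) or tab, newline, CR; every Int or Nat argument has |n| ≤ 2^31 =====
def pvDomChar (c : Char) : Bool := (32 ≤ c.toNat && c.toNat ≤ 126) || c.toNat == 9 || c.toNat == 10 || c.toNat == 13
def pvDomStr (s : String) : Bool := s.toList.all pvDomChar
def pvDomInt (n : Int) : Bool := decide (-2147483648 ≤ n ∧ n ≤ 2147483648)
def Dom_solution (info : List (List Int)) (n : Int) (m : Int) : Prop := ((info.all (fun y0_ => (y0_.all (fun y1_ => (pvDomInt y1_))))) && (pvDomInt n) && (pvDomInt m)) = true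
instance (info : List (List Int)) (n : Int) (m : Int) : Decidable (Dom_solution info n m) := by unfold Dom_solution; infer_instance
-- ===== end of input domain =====

-- B replaces A's breadth-first set of (A-cost,B-cost) pairs by a 1D DP: a candidate
-- list built by two comprehensions, regrouped into a dict of minimal A-cost per B-cost.

-- ===== PORT A =====
-- inner 'for a,b in record' loop building temp (result is order-independent: a set)
def aStep (n m v0 v1 : Int) (temp : PySem.Set (Int × Int)) (p : Int × Int) :
    PySem.Set (Int × Int) :=
  let temp := if p.1 + v0 < n then PySem.Set.add temp (p.1 + v0, p.2) else temp
  if p.2 + v1 < m then PySem.Set.add temp (p.1, p.2 + v1) else temp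

def solutionInner (n m : Int) (v : List Int) (rec : PySem.Set (Int × Int)) :
    PySem.Set (Int × Int) :=
  rec.foldl (aStep n m (PySem.List.pyGetD v 0 0) (PySem.List.pyGetD v 1 0)) PySem.Set.empty

-- the 'for i,v in enumerate(info)' loop with its early 'return -1' (idx = i+1 is dead code)
def solutionLoop (n m : Int) : List (List Int) → PySem.Set (Int × Int) →
    Option (PySem.Set (Int × Int))
  | [], rec => some rec
  | v :: rest, rec =>
      let temp := solutionInner n m v rec
      if PySem.Set.len temp = 0 then none
      else solutionLoop n m rest temp

def solution (info : List (List Int)) (n : Int) (m : Int) : Int :=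
  match solutionLoop n m info (PySem.Set.ofList [((0 : Int), (0 : Int))]) with
  | none => -1
  | some rec => rec.foldl (fun answer p => min answer p.1) n

-- ===== PORT B =====
-- the two list comprehensions over dp.items(), concatenated
def bCands (n m v0 v1 : Int) (items : List (Int × Int)) : List (Int × Int) :=
  items.filterMap (fun p => if p.2 + v0 < n then some (p.1, p.2 + v0) else none) ++
  items.filterMap (fun p => if p.1 + v1 < m then some (p.1 + v1, p.2) else none)

-- 'for b, a in cands: if b not in dp or a < dp[b]: dp[b] = a'
def bGroup (cands : List (Int × Int)) : PySem.Dict Int Int :=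
  cands.foldl
    (fun dp p =>
      if dp.contains p.1 = false || p.2 < dp.getD p.1 0 then dp.insert p.1 p.2 else dp)
    PySem.Dict.empty

-- the 'for v in info' loop, as a recursion returning the answer directly
def bGo (n m : Int) : List (List Int) → PySem.Dict Int Int → Int
  | [], dp => (PySem.List.min? (n :: dp.values) (fun x => x)).getD n
  | v :: rest, dp =>
      let cands := bCands n m (PySem.List.pyGetD v 0 0) (PySem.List.pyGetD v 1 0) dp.items
      if cands = [] then -1 else bGo n m rest (bGroup cands)

def solution_alt (info : List (List Int)) (n : Int) (m : Int) : Int :=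
  bGo n m info (PySem.Dict.ofList [((0 : Int), (0 : Int))])

-- ===== PRECONDITION & SPEC =====
-- Pre_ excludes inputs containing a cost row of fewer than two entries, on which A raises
-- IndexError unless an earlier row already made the state set empty (then A returns -1 and
-- B returns -1 too — see the cite in claim.json).
def Pre_solution (info : List (List Int)) (n : Int) (m : Int) : Prop :=
  ∀ v ∈ info, 2 ≤ v.length
instance (info : List (List Int)) (n : Int) (m : Int) : Decidable (Pre_solution info n m) := by
  unfold Pre_solution; infer_instance

def pvWitness_solution : List (List Int) × Int × Int := ([[1, 1], [2, 3]], 4, 4)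

def Spec_solution (info : List (List Int)) (n : Int) (m : Int) (out : Int) : Prop :=
  out = solution_alt info n m
instance (info : List (List Int)) (n : Int) (m : Int) (out : Int) :
    Decidable (Spec_solution info n m out) := by unfold Spec_solution; infer_instance

-- ===== CLAIM (what is proved, stated in full; the proofs are below) =====
def Claim_equal_solution : Prop := ∀ (info : List (List Int)) (n : Int) (m : Int),
  Dom_solution info n m → Pre_solution info n m → Spec_solution info n m (solution info n m)

-- ===== LEMMAS AND PROOFS =====

/-- `o` is the minimum of the (possibly empty) set `S` of integers, as an `Option`. -/
def IsMinOf (o : Option Int) (S : Int → Prop) : Prop :=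
  (∀ x, o = some x → S x ∧ ∀ y, S y → x ≤ y) ∧ (o = none → ∀ x, ¬ S x)

/-- The invariant tying A's pair set to B's dictionary. -/
def ABRel (rec : PySem.Set (Int × Int)) (dp : PySem.Dict Int Int) : Prop :=
  dp.keys.Nodup ∧ ∀ k, IsMinOf (dp.get? k) (fun x => (x, k) ∈ rec)

theorem isMinOf_congr {o : Option Int} {S T : Int → Prop} (h : ∀ x, S x ↔ T x)
    (hm : IsMinOf o S) : IsMinOf o T := by
  obtain ⟨h1, h2⟩ := hm
  refine ⟨fun x hx => ?_, fun hn x => (h x).not.mp (h2 hn x)⟩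
  obtain ⟨hs, hmin⟩ := h1 x hx
  exact ⟨(h x).mp hs, fun y hy => hmin y ((h y).mpr hy)⟩

/-- Transfer of the minimum across mutually dominating sets. -/
theorem isMinOf_of_dom {o : Option Int} {S T : Int → Prop}
    (hST : ∀ x, S x → T x) (hTS : ∀ y, T y → ∃ x, S x ∧ x ≤ y)
    (hm : IsMinOf o S) : IsMinOf o T := by
  obtain ⟨h1, h2⟩ := hm
  constructor
  · intro x hx
    obtain ⟨hs, hmin⟩ := h1 x hx
    refine ⟨hST x hs, fun y hy => ?_⟩
    obtain ⟨z, hz, hzy⟩ := hTS y hy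
    exact le_trans (hmin z hz) hzy
  · intro hn y hy
    obtain ⟨z, hz, _⟩ := hTS y hy
    exact h2 hn z hz

theorem isMinOf_union_assoc {o0 o1 o2 : Option Int} {P Q : Int → Prop}
    (h1 : IsMinOf o1 (fun x => o0 = some x ∨ P x))
    (h2 : IsMinOf o2 (fun x => o1 = some x ∨ Q x)) :
    IsMinOf o2 (fun x => (o0 = some x ∨ P x) ∨ Q x) := by
  obtain ⟨h1s, h1n⟩ := h1
  obtain ⟨h2s, h2n⟩ := h2
  constructor
  · intro x hx
    obtain ⟨hs, hmin⟩ := h2s x hx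
    constructor
    · rcases hs with h | h
      · exact Or.inl (h1s x h).1
      · exact Or.inr h
    · intro y hy
      rcases hy with h | h
      · cases ho1 : o1 with
        | none => exact absurd h (h1n ho1 y)
        | some z =>
            have hz := (h1s z ho1).2 y h
            exact le_trans (hmin z (Or.inl ho1)) hz
      · exact hmin y (Or.inr h)
  · intro hn x hx
    rcases hx with h | h
    · cases ho1 : o1 with
      | none => exact h1n ho1 x h
      | some z => exact h2n hn z (Or.inl ho1)
    · exact h2n hn x (Or.inr h)

/-- Candidate produced at key `k`, value `x`, by one dictionary entry `p = (b, a)`. -/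
def PCand (n m v0 v1 : Int) (p : Int × Int) (k x : Int) : Prop :=
  (p.2 + v0 < n ∧ k = p.1 ∧ x = p.2 + v0) ∨ (p.1 + v1 < m ∧ k = p.1 + v1 ∧ x = p.2)

/-- One step of B's grouping loop, named for the lemmas below. -/
def gStep (dp : PySem.Dict Int Int) (p : Int × Int) : PySem.Dict Int Int :=
  if dp.contains p.1 = false || p.2 < dp.getD p.1 0 then dp.insert p.1 p.2 else dp

theorem gStep_keys_nodup (nd : PySem.Dict Int Int) (p : Int × Int) (h : nd.keys.Nodup) :
    (gStep nd p).keys.Nodup := by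
  unfold gStep; split_ifs with h1
  · exact PySem.Dict.nodup_keys_insert _ _ _ h
  · exact h

theorem gStep_get?_of_ne (nd : PySem.Dict Int Int) (p : Int × Int) (j : Int) (h : j ≠ p.1) :
    (gStep nd p).get? j = nd.get? j := by
  unfold gStep; split_ifs with h1
  · exact PySem.Dict.get?_insert_of_ne nd p.2 h
  · rfl

theorem gStep_get?_self (nd : PySem.Dict Int Int) (p : Int × Int) :
    (gStep nd p).get? p.1 = some ((nd.get? p.1).elim p.2 (fun c => min c p.2)) := by
  unfold gStep
  cases hc : nd.get? p.1 with
  | none =>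
      have hcf : nd.contains p.1 = false := by
        have := PySem.Dict.contains_eq_isSome_get? (d := nd) (k := p.1)
        simp [this, hc]
      simp [hcf, PySem.Dict.get?_insert_self]
  | some c =>
      have hgd : nd.getD p.1 0 = c := by rw [PySem.Dict.getD_eq_get?_getD, hc]; rfl
      have hct : nd.contains p.1 = true := by
        have := PySem.Dict.contains_eq_isSome_get? (d := nd) (k := p.1)
        simp [this, hc]
      by_cases h1 : p.2 < c
      · rw [if_pos (by simp [hct, hgd]; omega), PySem.Dict.get?_insert_self]
        simp [Option.elim, min_eq_right (le_of_lt h1)]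
      · rw [if_neg (by simp [hct, hgd]; omega), hc]
        simp [Option.elim, min_eq_left (by omega : c ≤ p.2)]

theorem isMinOf_self (o : Option Int) : IsMinOf o (fun x => o = some x) := by
  constructor
  · intro x hx
    exact ⟨hx, fun y hy => by rw [hx] at hy; injection hy with h; omega⟩
  · intro hn x hx
    rw [hn] at hx; cases hx

theorem gStep_isMin (nd : PySem.Dict Int Int) (p : Int × Int) (k : Int) :
    IsMinOf ((gStep nd p).get? k) (fun x => nd.get? k = some x ∨ (k = p.1 ∧ x = p.2)) := by
  by_cases hk : k = p.1
  · subst hk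
    cases hc : nd.get? p.1 with
    | none =>
        rw [gStep_get?_self, hc]
        simp only [Option.elim_none]
        constructor
        · intro x hx
          injection hx with hx; subst hx
          refine ⟨Or.inr ⟨by trivial, by trivial⟩, ?_⟩
          rintro y (hy | ⟨-, rfl⟩)
          · cases hy
          · exact le_refl _
        · intro hn; cases hn
    | some c =>
        rw [gStep_get?_self, hc]
        simp only [Option.elim_some]
        constructor
        · intro x hx
          injection hx with hx; subst hx
          constructor
          · by_cases h : c ≤ p.2
            · rw [min_eq_left h]; exact Or.inl rfl
            · rw [min_eq_right (by omega : p.2 ≤ c)]; exact Or.inr ⟨by trivial, by trivial⟩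
          · rintro y (hy | ⟨-, rfl⟩)
            · injection hy with hy; subst hy; exact min_le_left _ _
            · exact min_le_right _ _
        · intro hn; cases hn
  · rw [gStep_get?_of_ne nd p k hk]
    constructor
    · intro x hx
      refine ⟨Or.inl hx, ?_⟩
      rintro y (hy | ⟨hkj, -⟩)
      · rw [hx] at hy; injection hy with h; omega
      · exact absurd hkj hk
    · rintro hn x (hx | ⟨hkj, -⟩)
      · rw [hn] at hx; cases hx
      · exact hk hkj

theorem gFold_isMin (l : List (Int × Int)) (acc : PySem.Dict Int Int) (k : Int) :
    IsMinOf ((l.foldl gStep acc).get? k) (fun x => acc.get? k = some x ∨ (k, x) ∈ l) := by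
  induction l generalizing acc with
  | nil =>
      refine isMinOf_congr ?_ (isMinOf_self (acc.get? k))
      intro x; simp
  | cons p t ih =>
      refine isMinOf_congr ?_
        (isMinOf_union_assoc (gStep_isMin acc p k) (ih (gStep acc p)))
      intro x; simp only [List.mem_cons]
      constructor
      · rintro ((h | ⟨rfl, rfl⟩) | h)
        · exact Or.inl h
        · exact Or.inr (Or.inl rfl)
        · exact Or.inr (Or.inr h)
      · rintro (h | (h | h))
        · exact Or.inl (Or.inl h)
        · exact Or.inl (Or.inr (by subst h; exact ⟨rfl, rfl⟩))
        · exact Or.inr h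
      
theorem mem_bCands (n m v0 v1 : Int) (items : List (Int × Int)) (k x : Int) :
    (k, x) ∈ bCands n m v0 v1 items ↔ ∃ p ∈ items, PCand n m v0 v1 p k x := by
  unfold bCands
  simp only [List.mem_append, List.mem_filterMap]
  constructor
  · rintro (⟨p, hp, hf⟩ | ⟨p, hp, hf⟩)
    · refine ⟨p, hp, Or.inl ?_⟩
      by_cases hc : p.2 + v0 < n
      · rw [if_pos hc] at hf
        injection hf with hf
        obtain ⟨h1, h2⟩ := Prod.mk.injEq .. ▸ hf
        exact ⟨hc, h1.symm, h2.symm⟩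
      · rw [if_neg hc] at hf; cases hf
    · refine ⟨p, hp, Or.inr ?_⟩
      by_cases hc : p.1 + v1 < m
      · rw [if_pos hc] at hf
        injection hf with hf
        obtain ⟨h1, h2⟩ := Prod.mk.injEq .. ▸ hf
        exact ⟨hc, h1.symm, h2.symm⟩
      · rw [if_neg hc] at hf; cases hf
  · rintro ⟨p, hp, (⟨hc, rfl, rfl⟩ | ⟨hc, rfl, rfl⟩)⟩
    · exact Or.inl ⟨p, hp, by rw [if_pos hc]⟩
    · exact Or.inr ⟨p, hp, by rw [if_pos hc]⟩

theorem bGroup_isMin (l : List (Int × Int)) (k : Int) :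
    IsMinOf ((bGroup l).get? k) (fun x => (k, x) ∈ l) := by
  refine isMinOf_congr ?_ (gFold_isMin l PySem.Dict.empty k)
  intro x; simp [PySem.Dict.get?_empty]

theorem bGroup_keys_nodup (l : List (Int × Int)) : (bGroup l).keys.Nodup := by
  unfold bGroup
  have : ∀ (l : List (Int × Int)) (acc : PySem.Dict Int Int), acc.keys.Nodup →
      (l.foldl gStep acc).keys.Nodup := by
    intro l
    induction l with
    | nil => intro acc h; exact h
    | cons p t ih => intro acc h; exact ih _ (gStep_keys_nodup acc p h)
  exact this l PySem.Dict.empty PySem.Dict.nodup_keys_empty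

theorem mem_inner (n m v0 v1 : Int) (rec : PySem.Set (Int × Int)) (q : Int × Int) :
    q ∈ rec.foldl (aStep n m v0 v1) PySem.Set.empty ↔
      ∃ p ∈ rec, (p.1 + v0 < n ∧ q = (p.1 + v0, p.2)) ∨ (p.2 + v1 < m ∧ q = (p.1, p.2 + v1)) := by
  have aux : ∀ (l : List (Int × Int)) (acc : PySem.Set (Int × Int)),
      q ∈ l.foldl (aStep n m v0 v1) acc ↔
        q ∈ acc ∨ ∃ p ∈ l, (p.1 + v0 < n ∧ q = (p.1 + v0, p.2)) ∨ (p.2 + v1 < m ∧ q = (p.1, p.2 + v1)) := by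
    intro l
    induction l with
    | nil => intro acc; simp
    | cons p t ih =>
        intro acc
        rw [List.foldl_cons, ih]
        have hstep : q ∈ aStep n m v0 v1 acc p ↔
            q ∈ acc ∨ (p.1 + v0 < n ∧ q = (p.1 + v0, p.2)) ∨ (p.2 + v1 < m ∧ q = (p.1, p.2 + v1)) := by
          unfold aStep
          split_ifs with h1 h2 h2 <;> simp [PySem.Set.mem_add] <;> tauto
        rw [hstep]
        simp only [List.mem_cons]
        constructor
        · rintro ((h | h) | ⟨r, hr, hP⟩)
          · exact Or.inl h
          · exact Or.inr ⟨p, Or.inl rfl, h⟩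
          · exact Or.inr ⟨r, Or.inr hr, hP⟩
        · rintro (h | ⟨r, (rfl | hr), hP⟩)
          · exact Or.inl (Or.inl h)
          · exact Or.inl (Or.inr hP)
          · exact Or.inr ⟨r, hr, hP⟩
  rw [aux rec PySem.Set.empty]
  simp [PySem.Set.empty]

theorem inner_rel (n m : Int) (v : List Int) (rec : PySem.Set (Int × Int))
    (dp : PySem.Dict Int Int) (h : ABRel rec dp) :
    ABRel (solutionInner n m v rec)
      (bGroup (bCands n m (PySem.List.pyGetD v 0 0) (PySem.List.pyGetD v 1 0) dp.items)) := by
  obtain ⟨hnd, hmin⟩ := h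
  refine ⟨bGroup_keys_nodup _, fun k => ?_⟩
  refine isMinOf_of_dom ?_ ?_
    (isMinOf_congr (fun x => mem_bCands n m _ _ dp.items k x) (bGroup_isMin _ k))
  · rintro x ⟨p, hp, hP⟩
    have hget : dp.get? p.1 = some p.2 := PySem.Dict.get?_of_mem_items dp hp hnd
    have hrec : (p.2, p.1) ∈ rec := ((hmin p.1).1 p.2 hget).1
    unfold solutionInner
    rw [mem_inner]
    rcases hP with ⟨hlt, rfl, rfl⟩ | ⟨hlt, rfl, rfl⟩
    · exact ⟨(p.2, p.1), hrec, Or.inl ⟨hlt, rfl⟩⟩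
    · exact ⟨(p.2, p.1), hrec, Or.inr ⟨hlt, rfl⟩⟩
  · intro y hy
    unfold solutionInner at hy
    rw [mem_inner] at hy
    obtain ⟨p, hp, hP⟩ := hy
    obtain ⟨amin, hg⟩ : ∃ a, dp.get? p.2 = some a := by
      cases hg : dp.get? p.2 with
      | none => exact ((((hmin p.2).2 hg p.1)) hp).elim
      | some a => exact ⟨a, rfl⟩
    have hlow : ∀ a', (a', p.2) ∈ rec → amin ≤ a' := ((hmin p.2).1 amin hg).2
    have hitems : (p.2, amin) ∈ dp.items := PySem.Dict.mem_items_of_get?_eq_some dp hg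
    rcases hP with ⟨hlt, heq⟩ | ⟨hlt, heq⟩ <;> rw [Prod.mk.injEq] at heq <;>
      obtain ⟨rfl, rfl⟩ := heq
    · exact ⟨amin + PySem.List.pyGetD v 0 0,
        ⟨(p.2, amin), hitems, Or.inl ⟨by have := hlow p.1 hp; omega, rfl, rfl⟩⟩,
        by have := hlow p.1 hp; omega⟩
    · exact ⟨amin, ⟨(p.2, amin), hitems, Or.inr ⟨hlt, rfl, rfl⟩⟩, hlow p.1 hp⟩

theorem inner_empty_iff (n m : Int) (v : List Int) (rec : PySem.Set (Int × Int))
    (dp : PySem.Dict Int Int) (h : ABRel rec dp) :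
    solutionInner n m v rec = [] ↔
      bCands n m (PySem.List.pyGetD v 0 0) (PySem.List.pyGetD v 1 0) dp.items = [] := by
  obtain ⟨hnd, hmin⟩ := h
  constructor
  · intro he
    cases hc : bCands n m (PySem.List.pyGetD v 0 0) (PySem.List.pyGetD v 1 0) dp.items with
    | nil => rfl
    | cons q t =>
        exfalso
        have hq : (q.1, q.2) ∈ bCands n m (PySem.List.pyGetD v 0 0) (PySem.List.pyGetD v 1 0) dp.items := by
          rw [hc]; exact List.mem_cons_self ..
        obtain ⟨p, hp, hP⟩ := (mem_bCands ..).mp hq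
        have hget : dp.get? p.1 = some p.2 := PySem.Dict.get?_of_mem_items dp hp hnd
        have hrec : (p.2, p.1) ∈ rec := ((hmin p.1).1 p.2 hget).1
        have : ∃ q', q' ∈ solutionInner n m v rec := by
          unfold solutionInner
          rcases hP with ⟨hlt, -, -⟩ | ⟨hlt, -, -⟩
          · exact ⟨(p.2 + PySem.List.pyGetD v 0 0, p.1),
              (mem_inner ..).mpr ⟨(p.2, p.1), hrec, Or.inl ⟨hlt, rfl⟩⟩⟩
          · exact ⟨(p.2, p.1 + PySem.List.pyGetD v 1 0),
              (mem_inner ..).mpr ⟨(p.2, p.1), hrec, Or.inr ⟨hlt, rfl⟩⟩⟩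
        obtain ⟨q', hq'⟩ := this
        rw [he] at hq'; cases hq'
  · intro hc
    cases he : solutionInner n m v rec with
    | nil => rfl
    | cons q t =>
        exfalso
        have hq : q ∈ solutionInner n m v rec := by rw [he]; exact List.mem_cons_self ..
        unfold solutionInner at hq
        rw [mem_inner] at hq
        obtain ⟨p, hp, hP⟩ := hq
        obtain ⟨amin, hg⟩ : ∃ a, dp.get? p.2 = some a := by
          cases hg : dp.get? p.2 with
          | none => exact ((((hmin p.2).2 hg p.1)) hp).elim
          | some a => exact ⟨a, rfl⟩
        have hlow : amin ≤ p.1 := ((hmin p.2).1 amin hg).2 p.1 hp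
        have hitems : (p.2, amin) ∈ dp.items := PySem.Dict.mem_items_of_get?_eq_some dp hg
        have : ∃ k x, (k, x) ∈ bCands n m (PySem.List.pyGetD v 0 0) (PySem.List.pyGetD v 1 0) dp.items := by
          rcases hP with ⟨hlt, -⟩ | ⟨hlt, -⟩
          · exact ⟨p.2, amin + PySem.List.pyGetD v 0 0,
              (mem_bCands ..).mpr ⟨(p.2, amin), hitems, Or.inl ⟨by omega, rfl, rfl⟩⟩⟩
          · exact ⟨p.2 + PySem.List.pyGetD v 1 0, amin,
              (mem_bCands ..).mpr ⟨(p.2, amin), hitems, Or.inr ⟨hlt, rfl, rfl⟩⟩⟩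
        obtain ⟨k, x, hkx⟩ := this
        rw [hc] at hkx; cases hkx

theorem foldl_min_eq_of_dom (a : Int) (l1 l2 : List Int)
    (h12 : ∀ x ∈ l1, ∃ y ∈ l2, y ≤ x) (h21 : ∀ x ∈ l2, ∃ y ∈ l1, y ≤ x) :
    l1.foldl min a = l2.foldl min a := by
  have key : ∀ (u w : List Int), (∀ x ∈ u, ∃ y ∈ w, y ≤ x) → w.foldl min a ≤ u.foldl min a := by
    intro u w hd
    rcases PySem.List.foldl_min_mem u a with h | h
    · rw [h]; exact (PySem.List.foldl_min_le w a).1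
    · obtain ⟨y, hy, hyx⟩ := hd _ h
      exact le_trans ((PySem.List.foldl_min_le w a).2 y hy) hyx
  exact le_antisymm (key l2 l1 h21) (key l1 l2 h12)

theorem final_eq (n : Int) (rec : PySem.Set (Int × Int)) (dp : PySem.Dict Int Int)
    (h : ABRel rec dp) :
    rec.foldl (fun answer p => min answer p.1) n =
      (PySem.List.min? (n :: dp.values) (fun x => x)).getD n := by
  obtain ⟨hnd, hmin⟩ := h
  rw [PySem.List.min?_id_cons]
  show rec.foldl (fun answer p => min answer p.1) n = dp.values.foldl min n
  have hfold : rec.foldl (fun answer p => min answer p.1) n = (rec.map (·.1)).foldl min n := by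
    rw [List.foldl_map]
  rw [hfold]
  have hvals : dp.values = dp.items.map (·.2) := rfl
  refine foldl_min_eq_of_dom n _ _ ?_ ?_
  · intro x hx
    obtain ⟨p, hp, rfl⟩ := List.mem_map.mp hx
    obtain ⟨amin, hg⟩ : ∃ a, dp.get? p.2 = some a := by
      cases hg : dp.get? p.2 with
      | none => exact ((((hmin p.2).2 hg p.1)) hp).elim
      | some a => exact ⟨a, rfl⟩
    have hlow : ∀ a', (a', p.2) ∈ rec → amin ≤ a' := ((hmin p.2).1 amin hg).2
    refine ⟨amin, ?_, hlow p.1 hp⟩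
    rw [hvals]
    exact List.mem_map.mpr ⟨(p.2, amin), PySem.Dict.mem_items_of_get?_eq_some dp hg, rfl⟩
  · intro y hy
    rw [hvals] at hy
    obtain ⟨p, hp, rfl⟩ := List.mem_map.mp hy
    have hget : dp.get? p.1 = some p.2 := PySem.Dict.get?_of_mem_items dp hp hnd
    have hrec : (p.2, p.1) ∈ rec := ((hmin p.1).1 p.2 hget).1
    exact ⟨p.2, List.mem_map.mpr ⟨(p.2, p.1), hrec, rfl⟩, le_refl _⟩

theorem go_agree (n m : Int) (info : List (List Int)) (rec : PySem.Set (Int × Int))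
    (dp : PySem.Dict Int Int) (h : ABRel rec dp) :
    (match solutionLoop n m info rec with
      | none => (-1 : Int)
      | some rec' => rec'.foldl (fun answer p => min answer p.1) n) = bGo n m info dp := by
  induction info generalizing rec dp with
  | nil => exact final_eq n rec dp h
  | cons v rest ih =>
      by_cases hc : bCands n m (PySem.List.pyGetD v 0 0) (PySem.List.pyGetD v 1 0) dp.items = []
      · have he : solutionInner n m v rec = [] := (inner_empty_iff n m v rec dp h).mpr hc
        have h1 : solutionLoop n m (v :: rest) rec = none := by
          simp [solutionLoop, PySem.Set.len, he]
        have h2 : bGo n m (v :: rest) dp = -1 := by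
          simp only [bGo]
          rw [if_pos hc]
        rw [h1, h2]
      · have he : ¬ solutionInner n m v rec = [] := fun hh =>
          hc ((inner_empty_iff n m v rec dp h).mp hh)
        have h1 : solutionLoop n m (v :: rest) rec = solutionLoop n m rest (solutionInner n m v rec) := by
          simp only [solutionLoop]
          rw [if_neg (by simp [PySem.Set.len, he])]
        have h2 : bGo n m (v :: rest) dp =
            bGo n m rest (bGroup (bCands n m (PySem.List.pyGetD v 0 0) (PySem.List.pyGetD v 1 0) dp.items)) := by
          simp only [bGo]
          rw [if_neg hc]
        rw [h1, h2]
        exact ih _ _ (inner_rel n m v rec dp h)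

theorem base_rel : ABRel (PySem.Set.ofList [((0 : Int), (0 : Int))])
    (PySem.Dict.ofList [((0 : Int), (0 : Int))]) := by
  constructor
  · decide
  · intro k
    by_cases hk : k = 0
    · subst hk
      have : (PySem.Dict.ofList [((0 : Int), (0 : Int))]).get? 0 = some 0 := by decide
      rw [this]
      constructor
      · intro x hx
        injection hx with hx; subst hx
        refine ⟨by decide, ?_⟩
        intro y hy
        simp [PySem.Set.ofList] at hy
        omega
      · intro hn; cases hn
    · have : (PySem.Dict.ofList [((0 : Int), (0 : Int))]).get? k = none := by
        rw [show PySem.Dict.ofList [((0 : Int), (0 : Int))] = PySem.Dict.empty.insert 0 0 from rfl]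
        rw [PySem.Dict.get?_insert_of_ne _ _ hk]
        exact PySem.Dict.get?_empty ..
      rw [this]
      constructor
      · intro x hx; cases hx
      · intro _ x hx
        simp [PySem.Set.ofList] at hx
        exact hk hx.2

-- ===== VERDICT (by name: the statement is the Claim_ definition above) =====
theorem solution_spec : Claim_equal_solution := by
  intro info n m _ _
  unfold Spec_solution solution solution_alt
  exact go_agree n m info _ _ base_rel
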